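-- pv_equiv track=rewrite | github.com/dvnstrcklnd/probable-tribble | probable_tribble.py | count_above_below
-- ===== SOURCE A (Python) =====
-- def count_above_below(lst: list, val: int) -> tuple:
--     below = 0
--     above = 0
--     for i in lst:
--         if i < val:
--             below += 1
--         elif i > val:
--             above += 1
--
--     return (below, above)
-- ===== SOURCE B (Python) =====
-- def _bisect_left(s, val):
--     lo, hi = 0, len(s)
--     while lo < hi:
--         mid = (lo + hi) // 2
--         if s[mid] < val:
--             lo = mid + 1
--         else:
--             hi = mid
--     return lo
--
--
-- def _bisect_right(s, val):
--     lo, hi = 0, len(s)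
--     while lo < hi:
--         mid = (lo + hi) // 2
--         if val < s[mid]:
--             hi = mid
--         else:
--             lo = mid + 1
--     return lo
--
--
-- def count_above_below(lst: list, val: int) -> tuple:
--     s = sorted(lst)
--     below = _bisect_left(s, val)
--     above = len(s) - _bisect_right(s, val)
--     return (below, above)
-- ===== Notes on version B (the rewrite author's own statement) =====
-- stated objective: alternative
-- what changed: Replaces the linear counting pass with sort-then-binary-search: B sorts a copy once and derives below/above from the bisect_left/bisect_right insertion positions instead of comparing every element to val in a loop.
import Mathlib
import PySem

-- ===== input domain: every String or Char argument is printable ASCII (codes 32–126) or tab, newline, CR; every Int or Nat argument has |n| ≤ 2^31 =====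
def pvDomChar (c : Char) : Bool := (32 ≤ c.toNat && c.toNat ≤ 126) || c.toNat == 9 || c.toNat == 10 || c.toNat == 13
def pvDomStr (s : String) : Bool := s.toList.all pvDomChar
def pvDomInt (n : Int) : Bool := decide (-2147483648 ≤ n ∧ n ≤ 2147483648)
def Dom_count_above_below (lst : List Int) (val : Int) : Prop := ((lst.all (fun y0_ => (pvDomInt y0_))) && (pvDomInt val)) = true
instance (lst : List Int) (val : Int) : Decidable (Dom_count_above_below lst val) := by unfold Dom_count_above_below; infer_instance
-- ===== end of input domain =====

-- B replaces A's linear counting pass by sort-then-binary-search (bisect positions); same results, an alternative algorithm.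

-- ===== PORT A =====
def count_above_below (lst : List Int) (val : Int) : Int × Int :=
  lst.foldl
    (fun (st : Int × Int) i =>
      if i < val then (st.1 + 1, st.2)
      else if i > val then (st.1, st.2 + 1)
      else st)
    (0, 0)

-- ===== PORT B =====
-- s = sorted(lst); below = bisect_left loop; above = len(s) - bisect_right loop
-- (PySem.List.bisectLeft/bisectRight are exactly Source B's hand-written binary-search loops)
def count_above_below_alt (lst : List Int) (val : Int) : Int × Int :=
  let s := PySem.List.sorted lst (fun x => x) false
  let below := PySem.List.bisectLeft s val
  let above := s.length - PySem.List.bisectRight s val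
  ((below : Int), (above : Int))

-- ===== PRECONDITION & SPEC =====
def Spec_count_above_below (lst : List Int) (val : Int) (out : Int × Int) : Prop := out = count_above_below_alt lst val
instance (lst : List Int) (val : Int) (out : Int × Int) : Decidable (Spec_count_above_below lst val out) := by unfold Spec_count_above_below; infer_instance

-- ===== CLAIM (what is proved, stated in full; the proofs are below) =====
def Claim_equal_count_above_below : Prop := ∀ (lst : List Int) (val : Int), Dom_count_above_below lst val → Spec_count_above_below lst val (count_above_below lst val)

-- ===== LEMMAS AND PROOFS =====

-- A's fold computes the two countP's.
theorem pv_foldl_count (lst : List Int) (val : Int) (b a : Int) :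
    lst.foldl
      (fun (st : Int × Int) i =>
        if i < val then (st.1 + 1, st.2)
        else if i > val then (st.1, st.2 + 1)
        else st)
      (b, a)
    = (b + (lst.countP (fun i => decide (i < val)) : Int),
       a + (lst.countP (fun i => decide (val < i)) : Int)) := by
  induction lst generalizing b a with
  | nil => simp
  | cons x t ih =>
    simp only [List.foldl_cons, List.countP_cons]
    by_cases h1 : x < val
    · have h2 : ¬ val < x := by omega
      simp [h1, h2, ih, GT.gt]
      ring
    · by_cases h2 : val < x
      · simp [h1, h2, ih, GT.gt]
        ring
      · simp [h1, h2, ih, GT.gt]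

theorem pv_bisectLeft_eq (s : List Int) (val : Int) (hs : s.Pairwise (· ≤ ·)) :
    PySem.List.bisectLeft s val = s.countP (fun i => decide (i < val)) := by
  obtain ⟨hle, hlt, hge⟩ := PySem.List.bisectLeft_spec s val hs
  set n := PySem.List.bisectLeft s val with hn
  have hsplit : s = s.take n ++ s.drop n := (List.take_append_drop n s).symm
  rw [hsplit, List.countP_append]
  have h1 : (s.take n).countP (fun i => decide (i < val)) = (s.take n).length := by
    apply List.countP_eq_length.2
    intro x hx
    obtain ⟨j, hj, hxj⟩ := List.mem_iff_getElem.1 hx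
    have hjlen : j < s.length := lt_of_lt_of_le hj (by simp [List.length_take])
    have hjn : j < n := lt_of_lt_of_le hj (by simp [List.length_take])
    have := hlt j hjlen hjn
    have hget : (s.take n)[j] = s[j] := List.getElem_take
    simp [← hxj, hget]
    omega
  have h2 : (s.drop n).countP (fun i => decide (i < val)) = 0 := by
    apply List.countP_eq_zero.2
    intro x hx
    obtain ⟨j, hj, hxj⟩ := List.mem_iff_getElem.1 hx
    have hjlen : n + j < s.length := by
      have := hj; simp [List.length_drop] at this; omega
    have := hge (n + j) hjlen (by omega)
    have hget : (s.drop n)[j] = s[n + j] := by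
      rw [List.getElem_drop]
    simp [← hxj, hget]
    omega
  rw [h1, h2, List.length_take]
  omega

theorem pv_bisectRight_eq (s : List Int) (val : Int) (hs : s.Pairwise (· ≤ ·)) :
    s.length - PySem.List.bisectRight s val = s.countP (fun i => decide (val < i)) := by
  obtain ⟨hle, hlt, hge⟩ := PySem.List.bisectRight_spec s val hs
  set n := PySem.List.bisectRight s val with hn
  have hsplit : s = s.take n ++ s.drop n := (List.take_append_drop n s).symm
  conv_rhs => rw [hsplit]
  rw [List.countP_append]
  have h1 : (s.take n).countP (fun i => decide (val < i)) = 0 := by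
    apply List.countP_eq_zero.2
    intro x hx
    obtain ⟨j, hj, hxj⟩ := List.mem_iff_getElem.1 hx
    have hjlen : j < s.length := lt_of_lt_of_le hj (by simp [List.length_take])
    have hjn : j < n := lt_of_lt_of_le hj (by simp [List.length_take])
    have := hlt j hjlen hjn
    have hget : (s.take n)[j] = s[j] := List.getElem_take
    simp [← hxj, hget]
    omega
  have h2 : (s.drop n).countP (fun i => decide (val < i)) = (s.drop n).length := by
    apply List.countP_eq_length.2
    intro x hx
    obtain ⟨j, hj, hxj⟩ := List.mem_iff_getElem.1 hx
    have hjlen : n + j < s.length := by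
      have := hj; simp [List.length_drop] at this; omega
    have := hge (n + j) hjlen (by omega)
    have hget : (s.drop n)[j] = s[n + j] := by
      rw [List.getElem_drop]
    simp [← hxj, hget]
    omega
  rw [h1, h2, List.length_drop]
  omega

-- ===== VERDICT (by name: the statement is the Claim_ definition above) =====
theorem count_above_below_spec : Claim_equal_count_above_below := by
  intro lst val _
  unfold Spec_count_above_below count_above_below count_above_below_alt
  set s := PySem.List.sorted lst (fun x => x) false with hsdef
  have hperm : s.Perm lst := PySem.List.sorted_perm lst (fun x => x) false
  have hpw : s.Pairwise (· ≤ ·) := by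
    have := PySem.List.sorted_pairwise (xs := lst) (key := fun x => x)
    simpa using this
  rw [pv_foldl_count]
  show _ = ((PySem.List.bisectLeft s val : Int), ((s.length - PySem.List.bisectRight s val : Nat) : Int))
  rw [pv_bisectLeft_eq s val hpw, pv_bisectRight_eq s val hpw]
  rw [hperm.countP_eq, hperm.countP_eq]
  simp
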